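-- pv_equiv track=rewrite | github.com/saisk7590-app/Python_Crash | Agents/main_agent.py | detect_tasks
-- ===== SOURCE A (Python) =====
-- def detect_tasks(user):
--
--     user = user.lower()
--     tasks = []
--
--     if "date" in user or "today" in user:
--         tasks.append("date")
--
--     if "location" in user or "where am i" in user:
--         tasks.append("location")
--
--     if "weather" in user:
--         tasks.append("weather")
--
--     if any(op in user for op in ["+", "-", "*", "/", "**"]):
--         tasks.append("calculator")
--
--     if "organize" in user or "clean folder" in user:
--         tasks.append("organize")
--
--     if "python" in user or "code" in user or "program" in user:
--         tasks.append("coding")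
--
--     if "research" in user or "detail" in user or "explain deeply" in user:
--         tasks.append("researcher")
--
--     if "explain" in user and "deeply" not in user:
--         tasks.append("mentor")
--
--     if "plan" in user or "schedule" in user:
--         tasks.append("planner")
--
--     if not tasks:
--         tasks.append("chat")
--
--     return tasks
-- ===== SOURCE B (Python) =====
-- KEYWORDS = ["date", "today", "location", "where am i", "weather",
--             "+", "-", "*", "/", "**",
--             "organize", "clean folder",
--             "python", "code", "program",
--             "research", "detail", "explain deeply",
--             "explain", "deeply",
--             "plan", "schedule"]
--
--
-- def _scan_hits(u):
--     # one sweep over the input: at each position collect every keyword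
--     # that starts there, instead of one substring search per keyword
--     hit = set()
--     for i in range(len(u) + 1):
--         for kw in KEYWORDS:
--             if u.startswith(kw, i):
--                 hit.add(kw)
--     return hit
--
--
-- def detect_tasks(user):
--     hit = _scan_hits(user.lower())
--     tasks = []
--     if "date" in hit or "today" in hit:
--         tasks.append("date")
--     if "location" in hit or "where am i" in hit:
--         tasks.append("location")
--     if "weather" in hit:
--         tasks.append("weather")
--     if "+" in hit or "-" in hit or "*" in hit or "/" in hit or "**" in hit:
--         tasks.append("calculator")
--     if "organize" in hit or "clean folder" in hit:
--         tasks.append("organize")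
--     if "python" in hit or "code" in hit or "program" in hit:
--         tasks.append("coding")
--     if "research" in hit or "detail" in hit or "explain deeply" in hit:
--         tasks.append("researcher")
--     if "explain" in hit and "deeply" not in hit:
--         tasks.append("mentor")
--     if "plan" in hit or "schedule" in hit:
--         tasks.append("planner")
--     if not tasks:
--         tasks.append("chat")
--     return tasks
-- ===== Notes on version B (the rewrite author's own statement) =====
-- stated objective: alternative
-- what changed: Replaces A's one-substring-search-per-keyword membership tests by a single left-to-right sweep over the lowered input that builds the set of all keywords starting at each position; the branch conditions then become lookups in that precomputed match set.
import Mathlib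
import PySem

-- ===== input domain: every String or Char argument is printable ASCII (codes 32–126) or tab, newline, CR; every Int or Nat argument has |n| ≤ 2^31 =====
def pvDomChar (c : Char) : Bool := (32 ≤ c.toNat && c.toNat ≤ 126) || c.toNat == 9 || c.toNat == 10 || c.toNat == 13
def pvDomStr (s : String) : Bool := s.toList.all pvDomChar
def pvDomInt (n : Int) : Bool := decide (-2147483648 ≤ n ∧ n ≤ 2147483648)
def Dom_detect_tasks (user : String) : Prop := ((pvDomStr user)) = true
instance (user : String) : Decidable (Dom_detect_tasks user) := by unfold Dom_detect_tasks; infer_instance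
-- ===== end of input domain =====

-- B replaces A's per-keyword substring searches by one sweep over the input collecting the set of matched keywords, then derives the tasks by set lookups (objective: alternative, same cost).

-- ===== PORT A =====
def detect_tasks (user : String) : List String :=
  let u := PySem.Str.lower user
  let tasks : List String := []
  let tasks := if PySem.Str.isIn "date" u || PySem.Str.isIn "today" u then tasks ++ ["date"] else tasks
  let tasks := if PySem.Str.isIn "location" u || PySem.Str.isIn "where am i" u then tasks ++ ["location"] else tasks
  let tasks := if PySem.Str.isIn "weather" u then tasks ++ ["weather"] else tasks
  let tasks := if (["+", "-", "*", "/", "**"].any fun op => PySem.Str.isIn op u) then tasks ++ ["calculator"] else tasks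
  let tasks := if PySem.Str.isIn "organize" u || PySem.Str.isIn "clean folder" u then tasks ++ ["organize"] else tasks
  let tasks := if PySem.Str.isIn "python" u || PySem.Str.isIn "code" u || PySem.Str.isIn "program" u then tasks ++ ["coding"] else tasks
  let tasks := if PySem.Str.isIn "research" u || PySem.Str.isIn "detail" u || PySem.Str.isIn "explain deeply" u then tasks ++ ["researcher"] else tasks
  let tasks := if PySem.Str.isIn "explain" u && !PySem.Str.isIn "deeply" u then tasks ++ ["mentor"] else tasks
  let tasks := if PySem.Str.isIn "plan" u || PySem.Str.isIn "schedule" u then tasks ++ ["planner"] else tasks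
  let tasks := if tasks.isEmpty then tasks ++ ["chat"] else tasks
  tasks

-- ===== PORT B =====
def kwList : List String :=
  ["date", "today", "location", "where am i", "weather",
   "+", "-", "*", "/", "**",
   "organize", "clean folder",
   "python", "code", "program",
   "research", "detail", "explain deeply",
   "explain", "deeply",
   "plan", "schedule"]

-- _scan_hits of Source B; 'u.startswith(kw, i)' with 0 ≤ i ≤ len(u) is exactly startswith on the suffix u[i:]
def scanHits (u : List Char) : PySem.Set String :=
  (PySem.List.pyRange 0 ((u.length : Int) + 1) 1).foldl
    (fun hit i =>
      kwList.foldl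
        (fun hit kw =>
          if PySem.Chars.startswith (u.drop i.toNat) kw.toList then PySem.Set.add hit kw else hit)
        hit)
    PySem.Set.empty

def detect_tasks_alt (user : String) : List String :=
  let hit := scanHits (PySem.Str.lower user).toList
  let tasks : List String := []
  let tasks := if PySem.Set.contains hit "date" || PySem.Set.contains hit "today" then tasks ++ ["date"] else tasks
  let tasks := if PySem.Set.contains hit "location" || PySem.Set.contains hit "where am i" then tasks ++ ["location"] else tasks
  let tasks := if PySem.Set.contains hit "weather" then tasks ++ ["weather"] else tasks
  let tasks := if PySem.Set.contains hit "+" || PySem.Set.contains hit "-" || PySem.Set.contains hit "*" || PySem.Set.contains hit "/" || PySem.Set.contains hit "**" then tasks ++ ["calculator"] else tasks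
  let tasks := if PySem.Set.contains hit "organize" || PySem.Set.contains hit "clean folder" then tasks ++ ["organize"] else tasks
  let tasks := if PySem.Set.contains hit "python" || PySem.Set.contains hit "code" || PySem.Set.contains hit "program" then tasks ++ ["coding"] else tasks
  let tasks := if PySem.Set.contains hit "research" || PySem.Set.contains hit "detail" || PySem.Set.contains hit "explain deeply" then tasks ++ ["researcher"] else tasks
  let tasks := if PySem.Set.contains hit "explain" && !PySem.Set.contains hit "deeply" then tasks ++ ["mentor"] else tasks
  let tasks := if PySem.Set.contains hit "plan" || PySem.Set.contains hit "schedule" then tasks ++ ["planner"] else tasks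
  let tasks := if tasks.isEmpty then tasks ++ ["chat"] else tasks
  tasks

-- ===== PRECONDITION & SPEC =====
def Spec_detect_tasks (user : String) (out : List String) : Prop := out = detect_tasks_alt user
instance (user : String) (out : List String) : Decidable (Spec_detect_tasks user out) := by unfold Spec_detect_tasks; infer_instance

-- ===== CLAIM (what is proved, stated in full; the proofs are below) =====
def Claim_equal_detect_tasks : Prop := ∀ (user : String), Dom_detect_tasks user → Spec_detect_tasks user (detect_tasks user)

-- ===== LEMMAS AND PROOFS =====

theorem mem_innerFold (cond : String → Bool) (l : List String) (s : PySem.Set String) (x : String) :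
    x ∈ l.foldl (fun hit kw => if cond kw then PySem.Set.add hit kw else hit) s ↔
      x ∈ s ∨ (x ∈ l ∧ cond x = true) := by
  induction l generalizing s with
  | nil => simp
  | cons a t ih =>
    simp only [List.foldl_cons, List.mem_cons]
    by_cases h : cond a = true
    · rw [if_pos h, ih, PySem.Set.mem_add]
      constructor
      · rintro ((hs | rfl) | ⟨ht, hc⟩)
        exacts [Or.inl hs, Or.inr ⟨Or.inl rfl, h⟩, Or.inr ⟨Or.inr ht, hc⟩]
      · rintro (hs | ⟨(rfl | ht), hc⟩)
        exacts [Or.inl (Or.inl hs), Or.inl (Or.inr rfl), Or.inr ⟨ht, hc⟩]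
    · rw [if_neg h, ih]
      constructor
      · rintro (hs | ⟨ht, hc⟩)
        exacts [Or.inl hs, Or.inr ⟨Or.inr ht, hc⟩]
      · rintro (hs | ⟨(rfl | ht), hc⟩)
        exacts [Or.inl hs, absurd hc h, Or.inr ⟨ht, hc⟩]

theorem mem_outerFold (u : List Char) (is : List Int) (s : PySem.Set String) (x : String) :
    x ∈ is.foldl
        (fun hit i =>
          kwList.foldl
            (fun hit kw =>
              if PySem.Chars.startswith (u.drop i.toNat) kw.toList then PySem.Set.add hit kw else hit)
            hit) s ↔
      x ∈ s ∨ (x ∈ kwList ∧ ∃ i ∈ is, PySem.Chars.startswith (u.drop i.toNat) x.toList = true) := by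
  induction is generalizing s with
  | nil => simp
  | cons i t ih =>
    rw [List.foldl_cons, ih, mem_innerFold]
    simp only [List.exists_mem_cons_iff]
    tauto

theorem contains_scanHits (u : List Char) (x : String) (hx : x ∈ kwList) :
    PySem.Set.contains (scanHits u) x = PySem.Chars.isIn x.toList u := by
  have h1 : PySem.Set.contains (scanHits u) x = true ↔ PySem.Chars.isIn x.toList u = true := by
    rw [PySem.Set.contains_iff, ← PySem.Chars.exists_prefix_drop_iff_isIn]
    unfold scanHits
    rw [mem_outerFold]
    simp only [PySem.Set.empty, List.not_mem_nil, false_or]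
    constructor
    · rintro ⟨-, i, _, hst⟩
      exact ⟨i.toNat, (PySem.Chars.startswith_iff _ _).mp hst⟩
    · rintro ⟨j, hj⟩
      refine ⟨hx, ((min j u.length : Nat) : Int), ?_, ?_⟩
      · rw [PySem.List.mem_pyRange_one]
        constructor
        · positivity
        · have : min j u.length ≤ u.length := Nat.min_le_right _ _
          omega
      · rw [PySem.Chars.startswith_iff]
        rw [Int.toNat_natCast]
        by_cases hle : j ≤ u.length
        · rwa [Nat.min_eq_left hle]
        · have hnil : u.drop j = [] := List.drop_eq_nil_of_le (by omega)
          rw [hnil] at hj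
          rw [List.prefix_nil.mp hj]
          exact List.nil_prefix
  cases hA : PySem.Set.contains (scanHits u) x <;> cases hB : PySem.Chars.isIn x.toList u <;> simp_all

-- ===== VERDICT (by name: the statement is the Claim_ definition above) =====
theorem detect_tasks_spec : Claim_equal_detect_tasks := by
  intro user _
  show detect_tasks user = detect_tasks_alt user
  simp only [detect_tasks, detect_tasks_alt, List.any_cons, List.any_nil, Bool.or_false]
  rw [contains_scanHits _ "date" (by decide), contains_scanHits _ "today" (by decide),
      contains_scanHits _ "location" (by decide), contains_scanHits _ "where am i" (by decide),
      contains_scanHits _ "weather" (by decide),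
      contains_scanHits _ "+" (by decide), contains_scanHits _ "-" (by decide),
      contains_scanHits _ "*" (by decide), contains_scanHits _ "/" (by decide),
      contains_scanHits _ "**" (by decide),
      contains_scanHits _ "organize" (by decide), contains_scanHits _ "clean folder" (by decide),
      contains_scanHits _ "python" (by decide), contains_scanHits _ "code" (by decide),
      contains_scanHits _ "program" (by decide),
      contains_scanHits _ "research" (by decide), contains_scanHits _ "detail" (by decide),
      contains_scanHits _ "explain deeply" (by decide),
      contains_scanHits _ "explain" (by decide), contains_scanHits _ "deeply" (by decide),
      contains_scanHits _ "plan" (by decide), contains_scanHits _ "schedule" (by decide)]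
  simp only [PySem.Str.isIn_eq, Bool.or_assoc]
  rfl
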